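-- pv_equiv track=rewrite | github.com/ckoons/BubbleSpacetimeTheory | play/toy_463_polynomial_wall.py | measure_denominator_sizes
-- ===== SOURCE A (Python) =====
-- def measure_denominator_sizes(n_points):
--     """Measure the denominator ∏_{j≠i} (x_i - x_j) for x=3..3+n-1."""
--     xs = list(range(3, 3 + n_points))
--     max_denom = 0
--     for i in range(n_points):
--         denom = 1
--         for j in range(n_points):
--             if j != i:
--                 denom *= abs(xs[i] - xs[j])
--         if denom > max_denom:
--             max_denom = denom
--     return max_denom
-- ===== SOURCE B (Python) =====
-- def measure_denominator_sizes(n_points):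
--     """Closed form: the largest denominator ∏_{j≠i}|x_i-x_j| over unit-spaced
--     points is attained at an endpoint and equals (n_points - 1)!."""
--     if n_points < 1:
--         return 0
--     result = 1
--     for k in range(2, n_points):
--         result *= k
--     return result
-- ===== Notes on version B (the rewrite author's own statement) =====
-- stated objective: faster
-- what changed: Replaces the O(n^2) double loop maximising the per-point product of absolute differences by the closed form (n-1)! (the maximum is attained at an endpoint), computed with a single running product.
import Mathlib
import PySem

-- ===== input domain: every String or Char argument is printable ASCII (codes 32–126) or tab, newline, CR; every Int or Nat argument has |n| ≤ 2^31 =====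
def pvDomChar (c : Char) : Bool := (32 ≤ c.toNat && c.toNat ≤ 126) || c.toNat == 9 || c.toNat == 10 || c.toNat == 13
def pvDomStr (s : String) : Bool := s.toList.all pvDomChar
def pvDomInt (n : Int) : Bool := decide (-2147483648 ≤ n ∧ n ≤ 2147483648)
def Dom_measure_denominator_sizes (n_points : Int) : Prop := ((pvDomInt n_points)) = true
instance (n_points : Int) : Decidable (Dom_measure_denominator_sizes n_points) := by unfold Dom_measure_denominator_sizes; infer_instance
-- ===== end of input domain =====

-- B replaces A's O(n^2) double loop by the closed form (n_points-1)! (the maximum product is at an endpoint), one running product.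

-- ===== PORT A =====
def measure_denominator_sizes (n_points : Int) : Int :=
  let xs := PySem.List.pyRange 3 (3 + n_points) 1
  (PySem.List.pyRange 0 n_points 1).foldl (fun max_denom i =>
    let denom := (PySem.List.pyRange 0 n_points 1).foldl (fun denom j =>
      if j ≠ i then denom * |PySem.List.pyGetD xs i 0 - PySem.List.pyGetD xs j 0| else denom) 1
    if denom > max_denom then denom else max_denom) 0

-- ===== PORT B =====
def measure_denominator_sizes_alt (n_points : Int) : Int :=
  if n_points < 1 then 0
  else (PySem.List.pyRange 2 n_points 1).foldl (fun result k => result * k) 1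

-- ===== PRECONDITION & SPEC =====
def Spec_measure_denominator_sizes (n_points : Int) (out : Int) : Prop := out = measure_denominator_sizes_alt n_points
instance (n_points : Int) (out : Int) : Decidable (Spec_measure_denominator_sizes n_points out) := by unfold Spec_measure_denominator_sizes; infer_instance

-- ===== CLAIM (what is proved, stated in full; the proofs are below) =====
def Claim_equal_measure_denominator_sizes : Prop := ∀ (n_points : Int), Dom_measure_denominator_sizes n_points → Spec_measure_denominator_sizes n_points (measure_denominator_sizes n_points)

-- ===== LEMMAS AND PROOFS =====

-- Q i m = the inner-loop product: prod over j < m, j ≠ i of |i-j|, as a Nat, by the loop's recursion.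
def pvQ (i : Nat) : Nat → Nat
  | 0 => 1
  | m+1 => if m = i then pvQ i m else pvQ i m * ((i - m) + (m - i))

lemma pvQ_le (i m : Nat) : m ≤ i → pvQ i m = i.descFactorial m := by
  induction m with
  | zero => simp [pvQ]
  | succ m ih =>
    intro h
    have hm : m ≠ i := by omega
    have h0 : m - i = 0 := by omega
    simp [pvQ, hm, ih (by omega), Nat.descFactorial_succ, h0, Nat.mul_comm]

lemma pvQ_gt (i t : Nat) : pvQ i (i + 1 + t) = i.factorial * t.factorial := by
  induction t with
  | zero => simp [pvQ, pvQ_le i i le_rfl, Nat.descFactorial_self]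
  | succ t ih =>
    have h1 : i + 1 + (t + 1) = (i + 1 + t) + 1 := by omega
    have h2 : i + 1 + t ≠ i := by omega
    have h3 : i - (i + 1 + t) = 0 := by omega
    have h4 : (i + 1 + t) - i = t + 1 := by omega
    rw [h1]
    simp only [pvQ, if_neg h2, h3, h4, ih, Nat.factorial_succ]
    ring

lemma pvQ_eq (i N : Nat) (h : i < N) : pvQ i N = i.factorial * (N - 1 - i).factorial := by
  have hN : N = i + 1 + (N - 1 - i) := by omega
  rw [hN, pvQ_gt]
  congr 2
  omega

lemma pvQ_le_fact (i N : Nat) (h : i < N) : pvQ i N ≤ (N - 1).factorial := by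
  rw [pvQ_eq i N h]
  have hd := Nat.factorial_mul_factorial_dvd_factorial_add i (N - 1 - i)
  have hc : i + (N - 1 - i) = N - 1 := by omega
  rw [hc] at hd
  exact Nat.le_of_dvd (Nat.factorial_pos _) hd

-- the inner loop on the pure index differences equals pvQ
lemma pvInner (i : Nat) (m : Nat) (acc : Int) :
    (PySem.List.pyRange 0 (m : Int) 1).foldl
      (fun d j => if j ≠ (i : Int) then d * |(i : Int) - j| else d) acc
    = acc * ((pvQ i m : Nat) : Int) := by
  induction m generalizing acc with
  | zero => simp [PySem.List.pyRange_one_eq_nil, pvQ]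
  | succ m ih =>
    rw [show ((m + 1 : Nat) : Int) = (m : Int) + 1 by push_cast; ring,
        PySem.List.pyRange_one_succ_right (by positivity), List.foldl_append, ih,
        List.foldl_cons, List.foldl_nil]
    by_cases hmi : m = i
    · subst hmi
      simp [pvQ]
    · have hne : (m : Int) ≠ (i : Int) := by exact_mod_cast hmi
      have habs : |(i : Int) - (m : Int)| = (((i - m) + (m - i) : Nat) : Int) := by
        rw [abs_sub_comm, Int.abs_eq_natAbs]
        omega
      rw [if_pos hne, habs]
      simp only [pvQ, if_neg hmi]
      push_cast
      ring

-- reading an element of xs = range(3, 3+N)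
lemma pvGet (N i : Int) (h0 : 0 ≤ i) (h1 : i < N) :
    PySem.List.pyGetD (PySem.List.pyRange 3 (3 + N) 1) i 0 = 3 + i := by
  have hlen : i < ((PySem.List.pyRange 3 (3 + N) 1).length : Int) := by
    rw [PySem.List.length_pyRange_one]; omega
  rw [PySem.List.pyGetD_eq_getElem _ _ h0 hlen, PySem.List.getElem_pyRange_one]
  omega

-- the outer loop never changes its accumulator when every candidate is ≤ it
lemma pvOuter (l : List Int) (f : Int → Int) (M : Int) (h : ∀ i ∈ l, f i ≤ M) :
    l.foldl (fun max_denom i => if f i > max_denom then f i else max_denom) M = M := by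
  induction l with
  | nil => rfl
  | cons a l ih =>
    have ha : ¬ f a > M := not_lt.mpr (h a (List.mem_cons_self ..))
    simp only [List.foldl_cons, ha, if_false]
    exact ih (fun i hi => h i (List.mem_cons_of_mem _ hi))

-- the inner loop of A, with xs-lookups, equals pvQ i.toNat N.toNat for 0 ≤ i < N
lemma pvInnerA (N i : Int) (h0 : 0 ≤ i) (h1 : i < N) :
    (PySem.List.pyRange 0 N 1).foldl
      (fun denom j => if j ≠ i then
          denom * |PySem.List.pyGetD (PySem.List.pyRange 3 (3 + N) 1) i 0 -
                   PySem.List.pyGetD (PySem.List.pyRange 3 (3 + N) 1) j 0| else denom) 1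
    = ((pvQ i.toNat N.toNat : Nat) : Int) := by
  rw [PySem.List.foldl_congr_mem _ _
      (fun d j => if j ≠ ((i.toNat : Nat) : Int) then d * |((i.toNat : Nat) : Int) - j| else d) _ ?_]
  · rw [show N = ((N.toNat : Nat) : Int) by omega, pvInner i.toNat N.toNat 1, one_mul, Int.toNat_natCast]
  · intro acc j hj
    rw [PySem.List.mem_pyRange_one] at hj
    rw [pvGet N i h0 h1, pvGet N j hj.1 hj.2, show ((i.toNat : Nat) : Int) = i by omega]
    have hc : 3 + i - (3 + j) = i - j := by ring
    rw [hc]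

-- B's product loop computes (m-1)!
lemma pvProd (m : Nat) (h : 1 ≤ m) :
    (PySem.List.pyRange 2 (m : Int) 1).foldl (fun result k => result * k) 1
      = (((m - 1).factorial : Nat) : Int) := by
  induction m with
  | zero => omega
  | succ m ih =>
    by_cases hm : m ≤ 1
    · interval_cases m <;> decide
    · rw [show ((m + 1 : Nat) : Int) = (m : Int) + 1 by push_cast; ring,
          PySem.List.pyRange_one_succ_right (by exact_mod_cast (by omega : (2:Nat) ≤ m) : (2:Int) ≤ (m:Int)),
          List.foldl_append, ih (by omega), List.foldl_cons, List.foldl_nil,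
          show m + 1 - 1 = m by omega, ← Nat.mul_factorial_pred (by omega : m ≠ 0)]
      push_cast
      ring

-- ===== VERDICT (by name: the statement is the Claim_ definition above) =====
theorem measure_denominator_sizes_spec : Claim_equal_measure_denominator_sizes := by
  intro n hd
  unfold Spec_measure_denominator_sizes measure_denominator_sizes measure_denominator_sizes_alt
  dsimp only
  by_cases hn : n < 1
  · rw [if_pos hn, PySem.List.pyRange_one_eq_nil (by omega : n ≤ (0:Int)), List.foldl_nil]
  · rw [if_neg hn]
    have hN : 1 ≤ n.toNat := by omega
    rw [PySem.List.foldl_congr_mem _ _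
        (fun max_denom i => if ((pvQ i.toNat n.toNat : Nat) : Int) > max_denom
            then ((pvQ i.toNat n.toNat : Nat) : Int) else max_denom) _ ?_]
    · have hbound : ∀ i ∈ PySem.List.pyRange 1 n 1,
          (fun i => ((pvQ i.toNat n.toNat : Nat) : Int)) i ≤ (((n.toNat - 1).factorial : Nat) : Int) := by
        intro i hi
        rw [PySem.List.mem_pyRange_one] at hi
        show ((pvQ i.toNat n.toNat : Nat) : Int) ≤ _
        exact_mod_cast pvQ_le_fact i.toNat n.toNat (by omega)
      have hout := pvOuter (PySem.List.pyRange 1 n 1)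
          (fun i => ((pvQ i.toNat n.toNat : Nat) : Int)) (((n.toNat - 1).factorial : Nat) : Int) hbound
      beta_reduce at hout
      have hQ0 : pvQ (0:Int).toNat n.toNat = (n.toNat - 1).factorial := by
        rw [Int.toNat_zero, pvQ_eq 0 n.toNat (by omega)]
        simp
      rw [PySem.List.pyRange_one_cons (by omega : (0:Int) < n), List.foldl_cons,
          if_pos (by rw [hQ0]; exact_mod_cast Nat.factorial_pos _ : ((pvQ (0:Int).toNat n.toNat : Nat) : Int) > 0),
          hQ0, show (0:Int) + 1 = 1 by ring, hout,
          show n = ((n.toNat : Nat) : Int) by omega, pvProd n.toNat hN, Int.toNat_natCast]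
    · intro acc i hi
      rw [PySem.List.mem_pyRange_one] at hi
      rw [pvInnerA n i hi.1 hi.2]
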